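-- pv_equiv track=rewrite | github.com/sueszli/vector-database-benchmark | dataset/python-mutated/pgcompleter.py | generate_alias
-- ===== SOURCE A (Python) =====
-- def generate_alias(tbl, alias_map=None):
--     if False:
--         while True:
--             i = 10
--     'Generate a table alias, consisting of all upper-case letters in\n    the table name, or, if there are no upper-case letters, the first letter +\n    all letters preceded by _\n    param tbl - unescaped name of the table to alias\n    '
--     if alias_map and tbl in alias_map:
--         return alias_map[tbl]
--     return ''.join([l for l in tbl if l.isupper()] or [l for (l, prev) in zip(tbl, '_' + tbl) if prev == '_' and l != '_'])
-- ===== SOURCE B (Python) =====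
-- def _heads(s):
--     # first letter of each underscore-delimited segment, recursing segment by segment
--     if not s:
--         return ''
--     if s[0] == '_':
--         return _heads(s[1:])
--     rest = s[1:]
--     while rest and rest[0] != '_':
--         rest = rest[1:]
--     return s[0] + _heads(rest)
--
--
-- def generate_alias(tbl, alias_map=None):
--     if alias_map and tbl in alias_map:
--         return alias_map[tbl]
--     upper = ''.join(c for c in tbl if c.isupper())
--     if upper:
--         return upper
--     return _heads(tbl)
-- ===== Notes on version B (the rewrite author's own statement) =====
-- stated objective: alternative
-- what changed: The fallback no longer zips the name against its underscore-prefixed shift and filters (char, prev-char) pairs; B recurses segment by segment: it emits the first character of a segment, skips the rest of that segment up to the next underscore, and recurses on the remainder, with the uppercase letters returned early.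
import Mathlib
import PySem

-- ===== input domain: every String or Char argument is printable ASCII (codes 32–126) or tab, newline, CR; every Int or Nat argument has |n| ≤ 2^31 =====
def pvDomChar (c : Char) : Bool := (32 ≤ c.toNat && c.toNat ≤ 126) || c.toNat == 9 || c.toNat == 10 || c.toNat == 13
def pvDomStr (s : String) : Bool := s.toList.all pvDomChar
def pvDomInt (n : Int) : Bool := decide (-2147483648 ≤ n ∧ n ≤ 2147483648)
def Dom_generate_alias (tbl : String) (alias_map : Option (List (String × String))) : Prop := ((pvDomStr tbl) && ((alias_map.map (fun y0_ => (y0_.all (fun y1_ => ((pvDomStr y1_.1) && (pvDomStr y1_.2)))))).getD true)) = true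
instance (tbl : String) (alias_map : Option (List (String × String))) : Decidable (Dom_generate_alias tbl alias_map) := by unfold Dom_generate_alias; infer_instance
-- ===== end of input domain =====

-- B replaces A's zip-against-shifted-name pair filter by a segment-by-segment recursion (emit first char, skip to next '_', recurse); alternative decomposition, same cost.

-- ===== PORT A =====
-- ''.join([l for l in tbl if l.isupper()] or [l for (l, prev) in zip(tbl, '_' + tbl) if prev == '_' and l != '_'])
def pvFallbackA (cs : List Char) : String :=
  let ups := cs.filter PySem.Chars.isupper
  if ups ≠ [] then String.ofList ups
  else String.ofList (((cs.zip ('_' :: cs)).filter (fun p => p.2 == '_' && p.1 != '_')).map Prod.fst)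

def generate_alias (tbl : String) (alias_map : Option (List (String × String))) : String :=
  -- 'if alias_map and tbl in alias_map: return alias_map[tbl]' (dict as assoc list, first match)
  match alias_map with
  | some m =>
    match m.lookup tbl with
    | some v => v
    | none => pvFallbackA tbl.toList
  | none => pvFallbackA tbl.toList

-- ===== PORT B =====
-- the 'while rest and rest[0] != '_': rest = rest[1:]' loop of _heads
def pvDropSeg : List Char → List Char
  | [] => []
  | c :: r => if c ≠ '_' then pvDropSeg r else c :: r

theorem pvDropSeg_length_le (r : List Char) : (pvDropSeg r).length ≤ r.length := by
  induction r with
  | nil => simp [pvDropSeg]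
  | cons c t ih =>
    simp only [pvDropSeg]
    split
    · exact le_trans ih (Nat.le_succ _)
    · exact le_refl _

-- _heads from Source B: first letter of each segment, recursing segment by segment
def pvHeads : List Char → List Char
  | [] => []
  | c :: r =>
    if c = '_' then pvHeads r
    else c :: pvHeads (pvDropSeg r)
termination_by cs => cs.length
decreasing_by
  · simp
  · simpa using Nat.lt_succ_of_le (pvDropSeg_length_le r)

def pvFallbackB (cs : List Char) : String :=
  let upper := cs.filter PySem.Chars.isupper
  if upper ≠ [] then String.ofList upper
  else String.ofList (pvHeads cs)

def generate_alias_alt (tbl : String) (alias_map : Option (List (String × String))) : String :=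
  match alias_map with
  | some m =>
    match m.lookup tbl with
    | some v => v
    | none => pvFallbackB tbl.toList
  | none => pvFallbackB tbl.toList

-- ===== PRECONDITION & SPEC =====
def Spec_generate_alias (tbl : String) (alias_map : Option (List (String × String))) (out : String) : Prop := out = generate_alias_alt tbl alias_map
instance (tbl : String) (alias_map : Option (List (String × String))) (out : String) : Decidable (Spec_generate_alias tbl alias_map out) := by unfold Spec_generate_alias; infer_instance

-- ===== CLAIM (what is proved, stated in full; the proofs are below) =====
def Claim_equal_generate_alias : Prop := ∀ (tbl : String) (alias_map : Option (List (String × String))), Dom_generate_alias tbl alias_map → Spec_generate_alias tbl alias_map (generate_alias tbl alias_map)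

-- ===== LEMMAS AND PROOFS =====

-- proof-only intermediate: the flag machine 'emit c iff previous char was _ and c ≠ _'
def pvFlag : List Char → Bool → List Char
  | [], _ => []
  | c :: rest, start =>
    if c = '_' then pvFlag rest true
    else if start then c :: pvFlag rest false
    else pvFlag rest false

-- A's pairwise filter on (char, previous char) equals the flag machine, the flag
-- recording whether the previous char was '_' (initially '_', the prefix of the zip).
theorem zip_filter_eq_flag (cs : List Char) (prev : Char) :
    ((cs.zip (prev :: cs)).filter (fun p => p.2 == '_' && p.1 != '_')).map Prod.fst
      = pvFlag cs (prev == '_') := by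
  induction cs generalizing prev with
  | nil => simp [pvFlag]
  | cons c rest ih =>
    by_cases hc : c = '_'
    · subst hc
      simp [pvFlag, ih '_']
    · by_cases hp : prev = '_'
      · subst hp
        simp [pvFlag, hc, ih c, beq_false_of_ne hc]
      · simp [pvFlag, hc, hp, ih c, beq_false_of_ne hc]

-- skipping the rest of a segment: the flag machine with flag=false agrees with
-- restarting (flag=true) from the first '_' onwards
theorem flag_false_eq_dropSeg (r : List Char) : pvFlag r false = pvFlag (pvDropSeg r) true := by
  induction r with
  | nil => simp [pvDropSeg, pvFlag]
  | cons c t ih =>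
    by_cases hc : c = '_'
    · subst hc; simp [pvDropSeg, pvFlag]
    · simp [pvDropSeg, pvFlag, hc, ih]

-- B's segment recursion equals the flag machine started with flag=true
theorem heads_eq_flag (cs : List Char) : pvHeads cs = pvFlag cs true := by
  induction hn : cs.length using Nat.strong_induction_on generalizing cs with
  | _ n ih =>
    match cs, hn with
    | [], _ => simp [pvHeads, pvFlag]
    | c :: r, hn =>
      by_cases hc : c = '_'
      · subst hc
        rw [pvHeads, pvFlag]
        simp only [if_pos]
        exact ih r.length (by simp [← hn]) r rfl
      · rw [pvHeads, pvFlag,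
            ih (pvDropSeg r).length
              (by simpa [← hn] using Nat.lt_succ_of_le (pvDropSeg_length_le r))
              (pvDropSeg r) rfl]
        simp only [if_neg hc, if_pos]
        exact congrArg (c :: ·) (flag_false_eq_dropSeg r).symm

theorem fallback_eq (cs : List Char) : pvFallbackA cs = pvFallbackB cs := by
  unfold pvFallbackA pvFallbackB
  rw [zip_filter_eq_flag cs '_', heads_eq_flag]
  simp

-- ===== VERDICT (by name: the statement is the Claim_ definition above) =====
theorem generate_alias_spec : Claim_equal_generate_alias := by
  intro tbl alias_map _
  unfold Spec_generate_alias generate_alias generate_alias_alt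
  cases alias_map with
  | none => exact fallback_eq tbl.toList
  | some m =>
    cases h : m.lookup tbl <;> simp [h, fallback_eq tbl.toList]
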